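-- pv_equiv track=rewrite | github.com/JaehyoJJAng/Algorithm | algorithm/goorm/cos-pro-2/37_남은 재료로 주스 만들기.py | solution
-- ===== SOURCE A (Python) =====
-- def solution(num_apple: int,num_carrot: int,k: int):
--     answer : int = 0
--     if num_apple < (3 * num_carrot):
--         answer = num_apple // 3
--     else:
--         answer = num_carrot
--
--     num_apple -= answer * 3
--     num_carrot -= answer
--
--     i = 0
--     k = k - (num_apple + num_carrot)
--
--     while k > 0:
--         if i % 4 == 0:
--             answer = answer - 1
--         i = i + 1
--         k = k - 1
--     return answer
-- ===== SOURCE B (Python) =====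
-- def solution(num_apple: int, num_carrot: int, k: int):
--     if num_apple < 3 * num_carrot:
--         answer = num_apple // 3
--     else:
--         answer = num_carrot
--     rem = k - (num_apple - 3 * answer) - (num_carrot - answer)
--     if rem > 0:
--         answer -= (rem + 3) // 4
--     return answer
-- ===== Notes on version B (the rewrite author's own statement) =====
-- stated objective: faster
-- what changed: replaces the O(k) decrement loop (one decrement every 4 iterations) by the closed form answer -= (rem+3)//4 when rem>0
import Mathlib
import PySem

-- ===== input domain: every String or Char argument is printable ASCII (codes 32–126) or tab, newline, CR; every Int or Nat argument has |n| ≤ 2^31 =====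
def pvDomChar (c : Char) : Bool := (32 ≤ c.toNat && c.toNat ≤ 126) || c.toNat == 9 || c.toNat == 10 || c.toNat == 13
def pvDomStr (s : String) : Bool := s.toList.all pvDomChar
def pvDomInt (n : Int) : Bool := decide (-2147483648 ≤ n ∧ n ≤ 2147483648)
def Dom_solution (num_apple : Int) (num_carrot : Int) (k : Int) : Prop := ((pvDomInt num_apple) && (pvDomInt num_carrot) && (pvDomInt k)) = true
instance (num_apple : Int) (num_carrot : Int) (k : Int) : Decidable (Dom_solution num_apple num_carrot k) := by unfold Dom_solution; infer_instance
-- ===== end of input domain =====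

-- B replaces A's O(k) decrement loop by the closed-form answer -= (rem+3)//4 when rem>0 (faster, asymptotic).


-- ===== PORT A =====
-- the while loop of A, state (answer, i, k)
def solutionLoop (answer : Int) (i : Int) (k : Int) : Int :=
  if 0 < k then
    solutionLoop (if PySem.Int.mod i 4 == 0 then answer - 1 else answer) (i + 1) (k - 1)
  else answer
termination_by k.toNat
decreasing_by omega

def solution (num_apple : Int) (num_carrot : Int) (k : Int) : Int :=
  let answer : Int :=
    if num_apple < 3 * num_carrot then PySem.Int.floordiv num_apple 3 else num_carrot
  let num_apple := num_apple - answer * 3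
  let num_carrot := num_carrot - answer
  solutionLoop answer 0 (k - (num_apple + num_carrot))

-- ===== PORT B =====
def solution_alt (num_apple : Int) (num_carrot : Int) (k : Int) : Int :=
  let answer : Int :=
    if num_apple < 3 * num_carrot then PySem.Int.floordiv num_apple 3 else num_carrot
  let rem := k - (num_apple - 3 * answer) - (num_carrot - answer)
  if 0 < rem then answer - PySem.Int.floordiv (rem + 3) 4 else answer

-- ===== PRECONDITION & SPEC =====
def Spec_solution (num_apple : Int) (num_carrot : Int) (k : Int) (out : Int) : Prop := out = solution_alt num_apple num_carrot k
instance (num_apple : Int) (num_carrot : Int) (k : Int) (out : Int) : Decidable (Spec_solution num_apple num_carrot k out) := by unfold Spec_solution; infer_instance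

-- ===== CLAIM (what is proved, stated in full; the proofs are below) =====
def Claim_equal_solution : Prop := ∀ (num_apple : Int) (num_carrot : Int) (k : Int), Dom_solution num_apple num_carrot k → Spec_solution num_apple num_carrot k (solution num_apple num_carrot k)

-- ===== LEMMAS AND PROOFS =====

-- closed form of A's loop: for i ≥ 0 it subtracts the number of multiples of 4 in [i, i+k)
theorem solutionLoop_closed (k : Int) (answer i : Int) (hi : 0 ≤ i) :
    solutionLoop answer i k =
      if 0 < k then answer - ((i + k - 1) / 4 - (i - 1) / 4) else answer := by
  generalize hn : k.toNat = n
  induction n generalizing answer i k with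
  | zero =>
    rw [solutionLoop]
    have : ¬ 0 < k := by omega
    simp [this]
  | succ n ih =>
    rw [solutionLoop]
    have hk : 0 < k := by omega
    have hmod : PySem.Int.mod i 4 = i % 4 := PySem.Int.mod_eq_emod_of_pos (by norm_num)
    simp only [hk, if_true, hmod, beq_iff_eq]
    rw [ih (k - 1) _ (i + 1) (by omega) (by omega)]
    split_ifs with h1 h2 h2 <;> omega

theorem solution_spec : Claim_equal_solution := by
  intro num_apple num_carrot k _
  unfold Spec_solution solution solution_alt
  simp only []
  set answer : Int :=
    if num_apple < 3 * num_carrot then PySem.Int.floordiv num_apple 3 else num_carrot with ha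
  rw [solutionLoop_closed _ _ _ (le_refl 0)]
  set rem := k - (num_apple - 3 * answer) - (num_carrot - answer) with hrem
  have h4 : PySem.Int.floordiv (rem + 3) 4 = (rem + 3) / 4 :=
    PySem.Int.floordiv_eq_ediv_of_pos (by norm_num)
  have harg : k - (num_apple - answer * 3 + (num_carrot - answer)) = rem := by
    rw [hrem]; ring
  rw [harg, h4]
  split_ifs with h <;> omega
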